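-- pv_equiv track=rewrite | github.com/kav-nsk/netology_python | main_json_xml_2.py | get_word_over_six_let
-- ===== SOURCE A (Python) =====
-- def get_word_over_six_let(incomingText):
--     """Выдает список слов из более чем шести прописных букв."""
--     incomingText = incomingText.split(' ')
--     output = sorted([word.lower() for word in incomingText], key=len, reverse=True)
--     for word in output:
--          if len(word) <= 6:                     # Удаляем слова из 6 и менее букв.
--              del output[output.index(word):]
--              break
--     return output
-- ===== SOURCE B (Python) =====
-- def get_word_over_six_let(incomingText):
--     """Выдает список слов из более чем шести прописных букв."""
--     buckets = {}
--     for word in incomingText.split(' '):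
--         w = word.lower()
--         n = len(w)
--         if n > 6:
--             buckets.setdefault(n, []).append(w)
--     out = []
--     for L in range(max(buckets, default=6), 6, -1):
--         out.extend(buckets.get(L, []))
--     return out
-- ===== Notes on version B (the rewrite author's own statement) =====
-- stated objective: alternative
-- what changed: Replaces sorted(key=len, reverse=True) followed by an index-and-delete truncation scan with a single-pass bucket (counting) sort: words longer than 6 letters are appended to per-length buckets, which are concatenated from the largest present length down to 7.
import Mathlib
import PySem

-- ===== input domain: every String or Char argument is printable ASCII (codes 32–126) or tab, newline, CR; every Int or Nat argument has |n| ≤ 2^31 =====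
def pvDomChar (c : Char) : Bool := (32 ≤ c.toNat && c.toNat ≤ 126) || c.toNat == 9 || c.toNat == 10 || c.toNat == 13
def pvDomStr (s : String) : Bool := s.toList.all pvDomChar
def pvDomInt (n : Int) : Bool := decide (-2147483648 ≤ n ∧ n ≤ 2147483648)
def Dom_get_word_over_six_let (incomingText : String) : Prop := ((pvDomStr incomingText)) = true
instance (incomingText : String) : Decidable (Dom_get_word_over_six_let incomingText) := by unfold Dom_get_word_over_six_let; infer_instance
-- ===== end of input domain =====

-- B replaces A's comparison sort + truncation scan by a single-pass bucket (counting) sort on word length; objective: alternative algorithm, same observable result.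

-- ===== PORT A =====
-- A's 'for word in output: if len(word) <= 6: del output[output.index(word):]; break'
-- (the loop breaks right after the del, so no mutated list is ever iterated further)
def aTruncate (output : List String) : List String → List String
  | [] => output
  | w :: rest =>
    if PySem.Str.len w ≤ 6 then
      match PySem.List.index? output w with
      | some i => List.take i output
      | none => output
    else aTruncate output rest

def get_word_over_six_let (incomingText : String) : List String :=
  let parts := (PySem.Str.split? incomingText " ").getD []   -- sep " " ≠ "", so split? is always some
  let output := PySem.List.sorted (parts.map (fun word => PySem.Str.lower word)) (fun w => PySem.Str.len w) true
  aTruncate output output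

-- ===== PORT B =====
-- 'buckets.setdefault(n, []).append(w)'
def bInsert (d : PySem.Dict Int (List String)) (word : String) : PySem.Dict Int (List String) :=
  let w := PySem.Str.lower word
  let n := PySem.Str.len w
  if 6 < n then d.modify n [] (fun l => l ++ [w]) else d

def get_word_over_six_let_alt (incomingText : String) : List String :=
  let buckets := ((PySem.Str.split? incomingText " ").getD []).foldl bInsert PySem.Dict.empty
  (PySem.List.pyRange (PySem.List.maxD buckets.keys (fun L => L) 6) 6 (-1)).foldl
    (fun out L => out ++ buckets.getD L []) []

-- ===== PRECONDITION & SPEC =====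
def Spec_get_word_over_six_let (incomingText : String) (out : List String) : Prop := out = get_word_over_six_let_alt incomingText
instance (incomingText : String) (out : List String) : Decidable (Spec_get_word_over_six_let incomingText out) := by unfold Spec_get_word_over_six_let; infer_instance

-- ===== CLAIM (what is proved, stated in full; the proofs are below) =====
def Claim_equal_get_word_over_six_let : Prop := ∀ (incomingText : String), Dom_get_word_over_six_let incomingText → Spec_get_word_over_six_let incomingText (get_word_over_six_let incomingText)

-- ===== LEMMAS AND PROOFS =====

theorem len_nonneg (w : String) : 0 ≤ PySem.Str.len w := by
  simp [PySem.Str.len_eq]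

-- insertBy passes over a block of elements it does not go before
theorem insertBy_append_no {α : Type} (before : α → α → Bool) (x : α) (as T : List α)
    (h : ∀ y ∈ as, before x y = false) :
    PySem.List.insertBy before x (as ++ T) = as ++ PySem.List.insertBy before x T := by
  induction as with
  | nil => simp
  | cons a as ih =>
    simp only [List.cons_append, PySem.List.insertBy, h a (by simp), Bool.false_eq_true,
      if_false]
    rw [ih (fun y hy => h y (by simp [hy]))]

theorem insertBy_all_yes {α : Type} (before : α → α → Bool) (x : α) (T : List α)
    (h : ∀ y ∈ T, before x y = true) :
    PySem.List.insertBy before x T = x :: T := by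
  cases T with
  | nil => simp [PySem.List.insertBy]
  | cons a T => simp [PySem.List.insertBy, h a (by simp)]

-- inserting a word into the concatenation of length-buckets appends it to its bucket
theorem insertBy_flatMap_buckets (x : String) (Ls : List Int) (g : Int → List String)
    (hs : Ls.Pairwise (· > ·)) (hx : PySem.Str.len x ∈ Ls)
    (hg : ∀ L ∈ Ls, ∀ y ∈ g L, PySem.Str.len y = L) :
    PySem.List.insertBy (fun a b => decide (PySem.Str.len b < PySem.Str.len a)) x (Ls.flatMap g)
      = Ls.flatMap (fun L => g L ++ if PySem.Str.len x == L then [x] else []) := by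
  induction Ls with
  | nil => simp at hx
  | cons L Ls ih =>
    rcases List.pairwise_cons.mp hs with ⟨hgt, hs'⟩
    by_cases hL : PySem.Str.len x = L
    · -- x goes to the end of bucket L; all later buckets hold strictly shorter words
      have hnot : PySem.Str.len x ∉ Ls := fun hmem => by have := hgt _ hmem; omega
      simp only [List.flatMap_cons]
      rw [insertBy_append_no _ _ _ _ (fun y hy => by
        have h1 := hg L (by simp) y hy
        simp only [decide_eq_false_iff_not]
        omega)]
      rw [insertBy_all_yes _ _ _ (fun y hy => by
        rcases List.mem_flatMap.mp hy with ⟨L', hL', hyL'⟩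
        have h1 := hg L' (by simp [hL']) y hyL'
        have h2 := hgt L' hL'
        simp only [decide_eq_true_eq]
        omega)]
      have : Ls.flatMap (fun L' => g L' ++ if PySem.Str.len x == L' then [x] else [])
          = Ls.flatMap g := by
        apply List.flatMap_congr
        intro L' hL'
        have hne : (PySem.Str.len x == L') = false := by
          simp only [beq_eq_false_iff_ne, ne_eq]
          exact fun h => hnot (h ▸ hL')
        rw [hne]
        simp
      rw [this]
      have hbeq : (PySem.Str.len x == L) = true := beq_iff_eq.mpr hL
      rw [hbeq]
      simp
    · have hx' : PySem.Str.len x ∈ Ls := by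
        rcases List.mem_cons.mp hx with h | h
        · exact absurd h hL
        · exact h
      simp only [List.flatMap_cons]
      rw [insertBy_append_no _ _ _ _ (fun y hy => by
        have hyL := hg L (by simp) y hy
        have hgtx : L > PySem.Str.len x := hgt _ hx'
        simp only [decide_eq_false_iff_not]
        omega)]
      rw [ih hs' hx' (fun L' hL' => hg L' (by simp [hL']))]
      have hne : (PySem.Str.len x == L) = false := beq_eq_false_iff_ne.mpr hL
      rw [hne]
      simp

-- stable descending sort by length IS the concatenation of the length buckets, top length first
theorem sorted_eq_flatMap_buckets (ws : List String) (M : Int)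
    (hM : ∀ w ∈ ws, PySem.Str.len w ≤ M) :
    PySem.List.sorted ws (fun w => PySem.Str.len w) true
      = (PySem.List.pyRange M (-1) (-1)).flatMap
          (fun L => ws.filter (fun w => PySem.Str.len w == L)) := by
  induction ws using List.reverseRecOn with
  | nil =>
    rw [PySem.List.sorted_rev_eq_foldl_insertBy]
    simp only [List.foldl_nil]
    exact (List.flatMap_eq_nil_iff.mpr (fun _ _ => rfl)).symm
  | append_singleton ws x ih =>
    have hM' : ∀ w ∈ ws, PySem.Str.len w ≤ M := fun w hw => hM w (by simp [hw])
    have hsorted : PySem.List.sorted (ws ++ [x]) (fun w => PySem.Str.len w) true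
        = PySem.List.insertBy (fun a b => decide (PySem.Str.len b < PySem.Str.len a)) x
            (PySem.List.sorted ws (fun w => PySem.Str.len w) true) := by
      rw [PySem.List.sorted_rev_eq_foldl_insertBy, List.foldl_append,
        ← PySem.List.sorted_rev_eq_foldl_insertBy]
      rfl
    rw [hsorted, ih hM']
    have hpw : (PySem.List.pyRange M (-1) (-1)).Pairwise (· > ·) := by
      rw [PySem.List.pyRange_neg_one_eq_reverse]
      rw [List.pairwise_reverse]
      exact PySem.List.pairwise_lt_pyRange_one _ _
    have hxmem : PySem.Str.len x ∈ PySem.List.pyRange M (-1) (-1) := by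
      rw [PySem.List.mem_pyRange_neg_one]
      exact ⟨by have := len_nonneg x; omega, hM x (by simp)⟩
    rw [insertBy_flatMap_buckets x _ _ hpw hxmem (fun L _ y hy => by
      have := List.of_mem_filter hy
      simpa using this)]
    apply List.flatMap_congr
    intro L _
    rw [List.filter_append]
    by_cases h : PySem.Str.len x = L
    · simp only [PySem.Str.len_eq, String.length_toList] at h
      simp [List.filter, h]
    · simp only [PySem.Str.len_eq, String.length_toList] at h
      have hb : (((x.length : Int)) == L) = false := by
        simp only [beq_eq_false_iff_ne, ne_eq]
        exact h
      simp [List.filter, hb]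

-- the bucket dictionary built by B's first loop: contents …
theorem bucket_getD (parts : List String) (d : PySem.Dict Int (List String)) (L : Int) :
    (parts.foldl bInsert d).getD L []
      = d.getD L [] ++ (parts.map (fun word => PySem.Str.lower word)).filter
          (fun w => decide (6 < PySem.Str.len w) && (PySem.Str.len w == L)) := by
  induction parts generalizing d with
  | nil => simp
  | cons word t ih =>
    simp only [List.foldl_cons, List.map_cons, List.filter]
    by_cases hp : 6 < PySem.Str.len (PySem.Str.lower word)
    · rw [show bInsert d word = d.modify (PySem.Str.len (PySem.Str.lower word)) []
          (fun l => l ++ [PySem.Str.lower word]) by simp only [bInsert]; rw [if_pos hp]]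
      rw [ih]
      by_cases hL : L = PySem.Str.len (PySem.Str.lower word)
      · rw [PySem.Dict.getD_modify, if_pos hL]
        subst hL
        simp only [PySem.Str.len_eq, PySem.Str.toList_lower] at hp
        simp [hp]
      · rw [PySem.Dict.getD_modify, if_neg hL]
        simp only [PySem.Str.len_eq, PySem.Str.toList_lower] at hL
        have hb : (((PySem.Chars.lower word.toList).length : Int) == L) = false := by
          simp only [beq_eq_false_iff_ne, ne_eq]
          exact fun h => hL h.symm
        simp [hb]
    · rw [show bInsert d word = d by simp only [bInsert]; rw [if_neg hp]]
      rw [ih]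
      have hd : decide (6 < PySem.Str.len (PySem.Str.lower word)) = false := by
        simpa using hp
      rw [hd]
      simp

-- … and keys
theorem bucket_mem_keys (parts : List String) (d : PySem.Dict Int (List String)) (L : Int) :
    L ∈ (parts.foldl bInsert d).keys
      ↔ L ∈ d.keys ∨ ∃ w ∈ parts.map (fun word => PySem.Str.lower word),
          6 < PySem.Str.len w ∧ PySem.Str.len w = L := by
  induction parts generalizing d with
  | nil => simp
  | cons word t ih =>
    simp only [List.foldl_cons, List.map_cons]
    by_cases hp : 6 < PySem.Str.len (PySem.Str.lower word)
    · rw [show bInsert d word = d.modify (PySem.Str.len (PySem.Str.lower word)) []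
          (fun l => l ++ [PySem.Str.lower word]) by simp only [bInsert]; rw [if_pos hp]]
      rw [ih]
      rw [show ∀ v, (d.modify (PySem.Str.len (PySem.Str.lower word)) [] v).keys
          = (d.insert (PySem.Str.len (PySem.Str.lower word))
              (v (d.getD (PySem.Str.len (PySem.Str.lower word)) []))).keys
        from fun v => PySem.Dict.keys_modify d _ _ v]
      rw [PySem.Dict.mem_keys_insert]
      constructor
      · rintro (h | h)
        · rcases h with h | h
          · exact Or.inr ⟨PySem.Str.lower word, by simp, hp, h.symm⟩
          · exact Or.inl h
        · rcases h with ⟨w, hw, h6, hL⟩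
          exact Or.inr ⟨w, by simp [hw], h6, hL⟩
      · rintro (h | ⟨w, hw, h6, hL⟩)
        · exact Or.inl (Or.inr h)
        · rcases List.mem_cons.mp hw with rfl | hw'
          · exact Or.inl (Or.inl hL.symm)
          · exact Or.inr ⟨w, hw', h6, hL⟩
    · rw [show bInsert d word = d by simp only [bInsert]; rw [if_neg hp]]
      rw [ih]
      constructor
      · rintro (h | ⟨w, hw, h6, hL⟩)
        · exact Or.inl h
        · exact Or.inr ⟨w, by simp [hw], h6, hL⟩
      · rintro (h | ⟨w, hw, h6, hL⟩)
        · exact Or.inl h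
        · rcases List.mem_cons.mp hw with rfl | hw'
          · exact absurd h6 hp
          · exact Or.inr ⟨w, hw', h6, hL⟩

-- index of the first occurrence of w in done ++ w :: rest when w is not in done
theorem index?_append_cons (l r : List String) (w : String) (h : w ∉ l) :
    PySem.List.index? (l ++ w :: r) w = some l.length := by
  rw [PySem.List.index?_eq_idxOf?]
  induction l with
  | nil => simp [List.idxOf?_cons]
  | cons a l ih =>
    have ha : (a == w) = false := by
      simp only [beq_eq_false_iff_ne, ne_eq]
      exact fun hw => h (by simp [hw])
    simp only [List.cons_append, List.idxOf?_cons, ha, Bool.false_eq_true, if_false]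
    rw [ih (fun hw => h (by simp [hw]))]
    simp

-- A's truncation loop returns exactly the words longer than six letters
theorem aTruncate_eq_filter (S : List String)
    (hpw : S.Pairwise (fun a b => PySem.Str.len b ≤ PySem.Str.len a)) :
    ∀ (rem done : List String), S = done ++ rem → (∀ w ∈ done, 6 < PySem.Str.len w) →
    aTruncate S rem = S.filter (fun w => decide (6 < PySem.Str.len w)) := by
  intro rem
  induction rem with
  | nil =>
    intro done hS hdone
    subst hS
    simp only [List.append_nil] at *
    rw [aTruncate]
    rw [List.filter_eq_self.mpr (fun w hw => by
      simp only [decide_eq_true_eq]; exact hdone w hw)]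
  | cons w rest ih =>
    intro done hS hdone
    rw [aTruncate]
    by_cases hw : PySem.Str.len w ≤ 6
    · rw [if_pos hw]
      have hnot : w ∉ done := fun hmem => absurd (hdone w hmem) (by omega)
      rw [hS, index?_append_cons done rest w hnot]
      have hrest : ∀ y ∈ rest, PySem.Str.len y ≤ PySem.Str.len w := by
        have := (List.pairwise_append.mp (hS ▸ hpw)).2.1
        exact (List.pairwise_cons.mp this).1
      have hfil : (done ++ w :: rest).filter (fun w => decide (6 < PySem.Str.len w)) = done := by
        rw [List.filter_append]
        rw [List.filter_eq_self.mpr (fun y hy => by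
          simp only [decide_eq_true_eq]; exact hdone y hy)]
        rw [List.filter_eq_nil_iff.mpr (fun y hy => by
          rcases List.mem_cons.mp hy with rfl | hy'
          · simp only [decide_eq_true_eq]; omega
          · have := hrest y hy'
            simp only [decide_eq_true_eq]; omega)]
        simp
      simp only [List.take_left]
      rw [hfil]
    · rw [if_neg hw]
      exact ih (done ++ [w]) (by simp [hS]) (fun y hy => by
        rcases List.mem_append.mp hy with hy' | hy'
        · exact hdone y hy'
        · simp at hy'; subst hy'; omega)

-- the whole pipeline, with the split parts generalized
theorem ports_core (parts : List String) :
    aTruncate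
      (PySem.List.sorted (parts.map (fun word => PySem.Str.lower word)) (fun w => PySem.Str.len w) true)
      (PySem.List.sorted (parts.map (fun word => PySem.Str.lower word)) (fun w => PySem.Str.len w) true)
    = (PySem.List.pyRange
          (PySem.List.maxD (parts.foldl bInsert PySem.Dict.empty).keys (fun L => L) 6) 6 (-1)).foldl
        (fun out L => out ++ (parts.foldl bInsert PySem.Dict.empty).getD L []) [] := by
  set ws := parts.map (fun word => PySem.Str.lower word) with hws
  set B := parts.foldl bInsert PySem.Dict.empty with hB
  set M := PySem.List.maxD B.keys (fun L => L) 6 with hMdef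
  have hkeys : ∀ L : Int, L ∈ B.keys ↔ ∃ w ∈ ws, 6 < PySem.Str.len w ∧ PySem.Str.len w = L := by
    intro L
    rw [hB, bucket_mem_keys]
    simp [hws]
  have h6M : 6 ≤ M := by
    rw [hMdef]
    unfold PySem.List.maxD
    cases hmx : PySem.List.max? B.keys (fun L => L) with
    | none => simp
    | some m =>
      simp only [Option.getD_some]
      rcases (hkeys m).mp (PySem.List.max?_mem hmx) with ⟨w, _, h6, hlen⟩
      omega
  have hbound : ∀ w ∈ ws, PySem.Str.len w ≤ M := by
    intro w hw
    by_cases h6 : 6 < PySem.Str.len w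
    · have hmem : PySem.Str.len w ∈ B.keys := (hkeys _).mpr ⟨w, hw, h6, rfl⟩
      cases hmx : PySem.List.max? B.keys (fun L => L) with
      | none =>
        rw [(PySem.List.max?_eq_none_iff _ _).mp hmx] at hmem
        simp at hmem
      | some m =>
        have hle := PySem.List.max?_isMax hmx _ hmem
        rw [hMdef]
        unfold PySem.List.maxD
        rw [hmx]
        simpa using hle
    · omega
  rw [aTruncate_eq_filter (PySem.List.sorted ws (fun w => PySem.Str.len w) true)
    (PySem.List.sorted_pairwise_rev ws (fun w => PySem.Str.len w))
    (PySem.List.sorted ws (fun w => PySem.Str.len w) true) [] rfl (by simp)]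
  rw [sorted_eq_flatMap_buckets ws M hbound]
  rw [List.filter_flatMap]
  have hsplit : PySem.List.pyRange M (-1) (-1)
      = PySem.List.pyRange M 6 (-1) ++ PySem.List.pyRange 6 (-1) (-1) := by
    rw [PySem.List.pyRange_neg_one_eq_reverse, PySem.List.pyRange_neg_one_eq_reverse,
      PySem.List.pyRange_neg_one_eq_reverse]
    rw [show (-1 : Int) + 1 = 0 by ring, show (6 : Int) + 1 = 7 by ring]
    rw [PySem.List.pyRange_one_append 0 7 (M + 1) (by omega) (by omega)]
    rw [List.reverse_append]
  rw [hsplit, List.flatMap_append]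
  have h2 : (PySem.List.pyRange 6 (-1) (-1)).flatMap
      (fun L => (ws.filter (fun w => PySem.Str.len w == L)).filter
        (fun w => decide (6 < PySem.Str.len w))) = [] := by
    apply List.flatMap_eq_nil_iff.mpr
    intro L hL
    rw [PySem.List.mem_pyRange_neg_one] at hL
    apply List.filter_eq_nil_iff.mpr
    intro y hy
    have h1 : PySem.Str.len y = L := by
      have := List.of_mem_filter hy
      simpa using this
    simp only [decide_eq_true_eq]
    omega
  rw [h2, List.append_nil]
  rw [PySem.List.foldl_append_eq_flatMap (fun L => B.getD L []) _ []]
  rw [List.nil_append]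
  apply List.flatMap_congr
  intro L hL
  rw [List.filter_filter]
  rw [hB, bucket_getD]
  rw [show (PySem.Dict.empty : PySem.Dict Int (List String)).getD L [] = [] from rfl]
  rw [List.nil_append]

theorem ports_eq (s : String) : get_word_over_six_let s = get_word_over_six_let_alt s := by
  simp only [get_word_over_six_let, get_word_over_six_let_alt]
  generalize (PySem.Str.split? s " ").getD [] = parts
  exact ports_core parts

-- ===== VERDICT (by name: the statement is the Claim_ definition above) =====
theorem get_word_over_six_let_spec : Claim_equal_get_word_over_six_let := by
  intro s _
  exact ports_eq s
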